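-- pv_equiv track=rewrite | github.com/paull87/advent-of-code-2024 | day_12/day_12.py | calculate_fence_size
-- ===== SOURCE A (Python) =====
-- def calculate_fence_size(area):
--     fences = 0
--     for y, x in area:
--         # top fences
--         if (y - 1, x) not in area:
--             fences += 1
--         # bottom fences
--         if (y + 1, x) not in area:
--             fences += 1
--         # left fences
--         if (y, x - 1) not in area:
--             fences += 1
--         # right_fences
--         if (y, x + 1) not in area:
--             fences += 1
--     return fences
-- ===== SOURCE B (Python) =====
-- def calculate_fence_size(area):
--     cells = set(area)
--     shared = 0
--     for y, x in area:
--         if (y, x + 1) in cells: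
--             shared += 1
--         if (y + 1, x) in cells:
--             shared += 1
--     return 4 * len(area) - 2 * shared
-- ===== Notes on version B (the rewrite author's own statement) =====
-- stated objective: alternative
-- what changed: B counts each interior shared edge exactly once (checking only the right and down neighbours per cell) and derives the perimeter arithmetically as 4*len(area) - 2*shared, instead of tallying the four exposed faces of every cell.
import Mathlib
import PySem

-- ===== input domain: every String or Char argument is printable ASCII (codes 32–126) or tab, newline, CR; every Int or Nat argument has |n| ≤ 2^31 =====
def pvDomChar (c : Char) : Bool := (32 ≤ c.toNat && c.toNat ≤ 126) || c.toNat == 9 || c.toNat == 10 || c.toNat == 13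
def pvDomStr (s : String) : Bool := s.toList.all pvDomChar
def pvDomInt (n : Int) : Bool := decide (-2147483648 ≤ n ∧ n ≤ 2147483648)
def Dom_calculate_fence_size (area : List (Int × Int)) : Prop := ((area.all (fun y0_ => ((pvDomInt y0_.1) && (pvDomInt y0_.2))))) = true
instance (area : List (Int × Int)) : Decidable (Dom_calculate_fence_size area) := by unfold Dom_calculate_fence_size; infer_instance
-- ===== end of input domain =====

-- B counts each interior shared edge once (right/down neighbours against a set) and
-- returns 4*len(area) - 2*shared instead of tallying all four exposed faces per cell.

-- ===== PORT A =====
def calculate_fence_size (area : List (Int × Int)) : Int :=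
  area.foldl (fun fences p =>
    let fences := if ¬ ((p.1 - 1, p.2) ∈ area) then fences + 1 else fences
    let fences := if ¬ ((p.1 + 1, p.2) ∈ area) then fences + 1 else fences
    let fences := if ¬ ((p.1, p.2 - 1) ∈ area) then fences + 1 else fences
    let fences := if ¬ ((p.1, p.2 + 1) ∈ area) then fences + 1 else fences
    fences) 0

-- ===== PORT B =====
def calculate_fence_size_alt (area : List (Int × Int)) : Int :=
  let cells : PySem.Set (Int × Int) := PySem.Set.ofList area
  let shared : Int := area.foldl (fun shared p =>
    let shared := if (p.1, p.2 + 1) ∈ cells then shared + 1 else shared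
    let shared := if (p.1 + 1, p.2) ∈ cells then shared + 1 else shared
    shared) 0
  4 * (area.length : Int) - 2 * shared

-- ===== PRECONDITION & SPEC =====
-- Pre_ excludes lists with duplicate coordinates (a region is a set of cells): there A
-- re-counts every duplicated occurrence and the 4n − 2·shared edge identity does not hold.
def Pre_calculate_fence_size (area : List (Int × Int)) : Prop := area.Nodup
instance (area : List (Int × Int)) : Decidable (Pre_calculate_fence_size area) := by
  unfold Pre_calculate_fence_size; infer_instance
def pvWitness_calculate_fence_size : (List (Int × Int)) := ([(0, 0), (0, 1)])
def Spec_calculate_fence_size (area : List (Int × Int)) (out : Int) : Prop := out = calculate_fence_size_alt area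
instance (area : List (Int × Int)) (out : Int) : Decidable (Spec_calculate_fence_size area out) := by unfold Spec_calculate_fence_size; infer_instance

-- ===== CLAIM (what is proved, stated in full; the proofs are below) =====
def Claim_equal_calculate_fence_size : Prop := ∀ (area : List (Int × Int)), Dom_calculate_fence_size area → Pre_calculate_fence_size area → Spec_calculate_fence_size area (calculate_fence_size area)

-- ===== LEMMAS AND PROOFS =====

-- sum of 0/1 indicators over a list = length of the filtered list
theorem pv_sum_ind {α : Type} (l : List α) (p : α → Bool) :
    (l.map (fun x => if p x then (1 : Int) else 0)).sum = ((l.filter p).length : Int) := by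
  induction l with
  | nil => simp
  | cons a t ih =>
    by_cases h : p a <;> simp [h, ih, add_comm]

theorem pv_sum_map_add {α : Type} (l : List α) (f g : α → Int) :
    (l.map (fun x => f x + g x)).sum = (l.map f).sum + (l.map g).sum := by
  induction l with
  | nil => simp
  | cons a t ih => simp [ih]; ring

theorem pv_sum_map_sub {α : Type} (l : List α) (c : Int) (f : α → Int) :
    (l.map (fun x => c - f x)).sum = c * l.length - (l.map f).sum := by
  induction l with
  | nil => simp
  | cons a t ih => simp [ih]; ring_nf

-- shift bijection: on a nodup list, as many cells have their (+e)-neighbour present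
-- as have their (−e)-neighbour present
theorem pv_shift (l : List (Int × Int)) (hl : l.Nodup) (e : Int × Int) :
    (l.map (fun x => if x + e ∈ l then (1 : Int) else 0)).sum =
    (l.map (fun x => if x - e ∈ l then (1 : Int) else 0)).sum := by
  have h1 : ∀ (q : (Int × Int) → Prop) [DecidablePred q],
      (l.map (fun x => if q x then (1 : Int) else 0)).sum
        = ((l.toFinset.filter q).card : Int) := by
    intro q _
    have := pv_sum_ind l (fun x => decide (q x))
    simp only [decide_eq_true_eq] at this
    rw [this]
    congr 1
    rw [← List.toFinset_card_of_nodup (hl.filter _), List.toFinset_filter]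
    congr 1
    ext x
    simp
  rw [h1 (fun x => x + e ∈ l), h1 (fun x => x - e ∈ l)]
  congr 1
  apply Finset.card_bij' (fun a _ => a + e) (fun b _ => b - e)
  · intro a ha
    simp only [Finset.mem_filter, List.mem_toFinset] at *
    exact ⟨ha.2, by simpa using ha.1⟩
  · intro b hb
    simp only [Finset.mem_filter, List.mem_toFinset] at *
    exact ⟨hb.2, by simpa using hb.1⟩
  · intro a _; simp
  · intro b _; simp

theorem calculate_fence_size_eq (area : List (Int × Int)) :
    calculate_fence_size area =
      4 * (area.length : Int)
        - ((area.map (fun p => if (p.1 - 1, p.2) ∈ area then (1 : Int) else 0)).sum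
          + (area.map (fun p => if (p.1 + 1, p.2) ∈ area then (1 : Int) else 0)).sum
          + (area.map (fun p => if (p.1, p.2 - 1) ∈ area then (1 : Int) else 0)).sum
          + (area.map (fun p => if (p.1, p.2 + 1) ∈ area then (1 : Int) else 0)).sum) := by
  unfold calculate_fence_size
  have hbody : (fun (fences : Int) (p : Int × Int) =>
      let fences := if ¬ ((p.1 - 1, p.2) ∈ area) then fences + 1 else fences
      let fences := if ¬ ((p.1 + 1, p.2) ∈ area) then fences + 1 else fences
      let fences := if ¬ ((p.1, p.2 - 1) ∈ area) then fences + 1 else fences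
      let fences := if ¬ ((p.1, p.2 + 1) ∈ area) then fences + 1 else fences
      fences)
    = (fun fences p => fences +
        ((4 : Int) - ((if (p.1 - 1, p.2) ∈ area then (1 : Int) else 0)
          + (if (p.1 + 1, p.2) ∈ area then (1 : Int) else 0)
          + (if (p.1, p.2 - 1) ∈ area then (1 : Int) else 0)
          + (if (p.1, p.2 + 1) ∈ area then (1 : Int) else 0)))) := by
    funext fences p
    simp only []
    split_ifs <;> ring
  rw [hbody, PySem.List.foldl_add]
  rw [pv_sum_map_sub]
  have := pv_sum_map_add area
    (fun p => (if (p.1 - 1, p.2) ∈ area then (1 : Int) else 0)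
      + (if (p.1 + 1, p.2) ∈ area then (1 : Int) else 0)
      + (if (p.1, p.2 - 1) ∈ area then (1 : Int) else 0))
    (fun p => if (p.1, p.2 + 1) ∈ area then (1 : Int) else 0)
  rw [pv_sum_map_add, pv_sum_map_add, pv_sum_map_add]
  ring

theorem calculate_fence_size_alt_eq (area : List (Int × Int)) :
    calculate_fence_size_alt area =
      4 * (area.length : Int)
        - 2 * ((area.map (fun p => if (p.1, p.2 + 1) ∈ area then (1 : Int) else 0)).sum
          + (area.map (fun p => if (p.1 + 1, p.2) ∈ area then (1 : Int) else 0)).sum) := by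
  unfold calculate_fence_size_alt
  have hbody : (fun (shared : Int) (p : Int × Int) =>
      let shared := if (p.1, p.2 + 1) ∈ PySem.Set.ofList area then shared + 1 else shared
      let shared := if (p.1 + 1, p.2) ∈ PySem.Set.ofList area then shared + 1 else shared
      shared)
    = (fun shared p => shared +
        ((if (p.1, p.2 + 1) ∈ area then (1 : Int) else 0)
          + (if (p.1 + 1, p.2) ∈ area then (1 : Int) else 0))) := by
    funext shared p
    simp only [PySem.Set.mem_ofList]
    split_ifs <;> ring
  simp only [hbody, PySem.List.foldl_add]
  rw [pv_sum_map_add]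
  ring

-- ===== VERDICT (by name: the statement is the Claim_ definition above) =====
theorem calculate_fence_size_spec : Claim_equal_calculate_fence_size := by
  intro area _ hpre
  unfold Spec_calculate_fence_size
  rw [calculate_fence_size_eq, calculate_fence_size_alt_eq]
  have hv := pv_shift area hpre (1, 0)
  have hh := pv_shift area hpre (0, 1)
  have e1 : ∀ p : Int × Int, p + ((1 : Int), (0 : Int)) = (p.1 + 1, p.2) := by
    intro p; simp [Prod.ext_iff]
  have e2 : ∀ p : Int × Int, p - ((1 : Int), (0 : Int)) = (p.1 - 1, p.2) := by
    intro p; simp [Prod.ext_iff]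
  have e3 : ∀ p : Int × Int, p + ((0 : Int), (1 : Int)) = (p.1, p.2 + 1) := by
    intro p; simp [Prod.ext_iff]
  have e4 : ∀ p : Int × Int, p - ((0 : Int), (1 : Int)) = (p.1, p.2 - 1) := by
    intro p; simp [Prod.ext_iff]
  simp only [e1, e2, e3, e4] at hv hh
  rw [← hv, ← hh]
  ring
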